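-- pv_equiv track=rewrite | github.com/HossemCharrak/crypto | payloads.py | eliminate_common_leftmost_bytes
-- ===== SOURCE A (Python) =====
-- from typing import List
--
-- def eliminate_common_leftmost_bytes(int_array: List[int]) -> List[str]:
--     # Step 1: Convert integers to bytes
--     # Determine the maximum number of bytes needed to represent the largest integer
--     max_bytes = max((x.bit_length() + 7) // 8 for x in int_array)
--
--     # Convert each integer to bytes with the same length (big-endian)
--     bytes_array = [x.to_bytes(max_bytes, byteorder='big') for x in int_array]
--
--     # Step 2: Find the longest common prefix (leftmost bytes)
--     common_prefix = b""
--     for i in range(max_bytes):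
--         # Get the i-th byte from the first element
--         current_byte = bytes_array[0][i]
--
--         # Check if all elements have the same byte at this position
--         if all(b[i] == current_byte for b in bytes_array):
--             common_prefix += bytes([current_byte])
--         else:
--             break
--
--     # Step 3: Eliminate the common prefix from each bytes object
--     result_bytes = [b[len(common_prefix):] for b in bytes_array]
--
--     # Step 4: Convert the resulting bytes to hex strings
--     result_hex = [b.hex() for b in result_bytes]
--
--     return result_hex
-- ===== SOURCE B (Python) =====
-- from typing import List
--
-- def eliminate_common_leftmost_bytes(int_array: List[int]) -> List[str]:
--     max_bytes = max((x.bit_length() + 7) // 8 for x in int_array)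
--     bytes_array = [x.to_bytes(max_bytes, byteorder='big') for x in int_array]
--
--     # Horizontal scan: fold the pairwise longest-common-prefix over the list.
--     prefix = bytes_array[0]
--     for b in bytes_array[1:]:
--         n = 0
--         while n < len(prefix) and prefix[n] == b[n]:
--             n += 1
--         prefix = prefix[:n]
--
--     return [b[len(prefix):].hex() for b in bytes_array]
-- ===== Notes on version B (the rewrite author's own statement) =====
-- stated objective: simpler
-- what changed: Replaced A's vertical column scan (outer loop over byte positions, inner all() over every element per position, building the prefix bytes) by a horizontal fold: the common prefix is the pairwise longest-common-prefix folded over the list; Pre_ excludes the empty list (max() raises ValueError) and negative integers (to_bytes raises OverflowError), where both programs raise.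
import Mathlib
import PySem

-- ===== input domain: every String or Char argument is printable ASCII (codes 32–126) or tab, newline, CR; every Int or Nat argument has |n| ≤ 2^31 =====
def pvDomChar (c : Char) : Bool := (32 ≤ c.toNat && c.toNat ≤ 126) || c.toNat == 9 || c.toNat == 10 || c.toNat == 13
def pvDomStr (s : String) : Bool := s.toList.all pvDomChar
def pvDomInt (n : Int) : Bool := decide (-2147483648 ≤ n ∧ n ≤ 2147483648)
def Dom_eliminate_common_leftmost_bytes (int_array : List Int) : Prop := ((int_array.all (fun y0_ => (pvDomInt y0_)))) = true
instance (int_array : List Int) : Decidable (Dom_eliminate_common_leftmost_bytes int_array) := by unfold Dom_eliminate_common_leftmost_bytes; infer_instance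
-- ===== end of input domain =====

-- B replaces A's vertical per-position scan by a fold of pairwise longest common prefixes: simpler/shorter.

-- Shared byte-level helpers (ports of Python builtins used by both programs).
-- Python x.bit_length() for x ≥ 0 (negatives are excluded by Pre_, where Python raises in to_bytes).
def pvBitLen (x : Int) : Nat := x.toNat.size

-- Python x.to_bytes(n, byteorder='big') for 0 ≤ x < 256^n, as a list of byte values.
def pvToBytesBE (x : Int) (n : Nat) : List Nat :=
  (List.range n).map (fun i => x.toNat / 256 ^ (n - 1 - i) % 256)

def pvHexDigit (n : Nat) : Char := Char.ofNat (if n < 10 then 48 + n else 87 + n)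

-- Python bytes.hex(): two lowercase hex digits per byte.
def pvHex (bs : List Nat) : String := String.mk (bs.flatMap (fun b => [pvHexDigit (b / 16), pvHexDigit (b % 16)]))

-- ===== PORT A =====
-- A's Step-2 loop: for i in range(max_bytes): if all(b[i]==bytes_array[0][i]) extend prefix else break.
-- b[i] ported as getD _ 0: exact here since the loop only reaches i < max_bytes = length of every b.
def pvALoop (ba : List (List Nat)) (first : List Nat) : Nat → Nat → List Nat → List Nat
  | _, 0, acc => acc
  | i, fuel + 1, acc =>
    let cb := first.getD i 0
    if ba.all (fun b => b.getD i 0 == cb) then pvALoop ba first (i + 1) fuel (acc ++ [cb])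
    else acc

def eliminate_common_leftmost_bytes (int_array : List Int) : List String :=
  let max_bytes := ((int_array.map (fun x => (pvBitLen x + 7) / 8)).max?).getD 0
  let bytes_array := int_array.map (fun x => pvToBytesBE x max_bytes)
  let common_prefix := pvALoop bytes_array (bytes_array.headD []) 0 max_bytes []
  let result_bytes := bytes_array.map (fun b => b.drop common_prefix.length)
  result_bytes.map pvHex

-- ===== PORT B =====
-- the inner while loop of Source B: count equal leading bytes of two byte strings
def pvLcp2 : List Nat → List Nat → Nat
  | a :: as, b :: bs => if a = b then pvLcp2 as bs + 1 else 0
  | _, _ => 0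

def eliminate_common_leftmost_bytes_alt (int_array : List Int) : List String :=
  let max_bytes := ((int_array.map (fun x => (pvBitLen x + 7) / 8)).max?).getD 0
  let bytes_array := int_array.map (fun x => pvToBytesBE x max_bytes)
  let pref := bytes_array.tail.foldl (fun p b => p.take (pvLcp2 p b)) (bytes_array.headD [])
  bytes_array.map (fun b => pvHex (b.drop pref.length))

-- ===== PRECONDITION & SPEC =====
-- Pre_ excludes exactly the inputs where Python A raises: the empty list (max() over an empty
-- generator raises ValueError) and lists containing a negative integer (to_bytes raises OverflowError).
def Pre_eliminate_common_leftmost_bytes (int_array : List Int) : Prop :=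
  int_array ≠ [] ∧ ∀ x ∈ int_array, 0 ≤ x
instance (int_array : List Int) : Decidable (Pre_eliminate_common_leftmost_bytes int_array) := by
  unfold Pre_eliminate_common_leftmost_bytes; infer_instance

def pvWitness_eliminate_common_leftmost_bytes : List Int := [255, 256, 257]

def Spec_eliminate_common_leftmost_bytes (int_array : List Int) (out : List String) : Prop := out = eliminate_common_leftmost_bytes_alt int_array
instance (int_array : List Int) (out : List String) : Decidable (Spec_eliminate_common_leftmost_bytes int_array out) := by unfold Spec_eliminate_common_leftmost_bytes; infer_instance

-- ===== CLAIM (what is proved, stated in full; the proofs are below) =====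
def Claim_equal_eliminate_common_leftmost_bytes : Prop := ∀ (int_array : List Int), Dom_eliminate_common_leftmost_bytes int_array → Pre_eliminate_common_leftmost_bytes int_array → Spec_eliminate_common_leftmost_bytes int_array (eliminate_common_leftmost_bytes int_array)

-- ===== LEMMAS AND PROOFS =====

theorem pvLcp2_self (u : List Nat) : pvLcp2 u u = u.length := by
  induction u with
  | nil => rfl
  | cons a as ih => simp [pvLcp2, ih]

theorem pvLcp2_nil (b : List Nat) : pvLcp2 [] b = 0 := by
  cases b <;> rfl

theorem pvLcp2_take (p b : List Nat) (m : Nat) :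
    pvLcp2 (p.take m) b = min m (pvLcp2 p b) := by
  induction p generalizing b m with
  | nil => simp [pvLcp2_nil]
  | cons a as ih =>
    cases m with
    | zero => simp [pvLcp2_nil]
    | succ m =>
      cases b with
      | nil => simp [pvLcp2]
      | cons c cs =>
        by_cases h : a = c
        · simp [pvLcp2, h, ih, Nat.succ_min_succ]
        · simp [pvLcp2, h]

theorem pvLcp2_ge_iff_take (u v : List Nat) (k : Nat)
    (hu : k ≤ u.length) (hv : k ≤ v.length) :
    (k ≤ pvLcp2 u v ↔ u.take k = v.take k) := by
  induction k generalizing u v with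
  | zero => simp
  | succ k ih =>
    cases u with
    | nil => simp at hu
    | cons a as =>
      cases v with
      | nil => simp at hv
      | cons c cs =>
        simp only [List.length_cons, Nat.succ_le_succ_iff] at hu hv
        by_cases h : a = c
        · simp [pvLcp2, h, Nat.succ_le_succ_iff, ih as cs hu hv]
        · simp [pvLcp2, h]

theorem pvTake_eq_getD (u v : List Nat) (k i : Nat) (h : u.take k = v.take k) (hik : i < k) :
    u.getD i 0 = v.getD i 0 := by
  have := congrArg (fun l => l.getD i 0) h
  simpa [List.getD_eq_getElem?_getD, List.getElem?_take, hik] using this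

theorem pvTake_succ_getD (l : List Nat) (i : Nat) (h : i < l.length) :
    l.take (i + 1) = l.take i ++ [l.getD i 0] := by
  induction l generalizing i with
  | nil => simp at h
  | cons a as ih =>
    cases i with
    | zero => simp
    | succ i => simp [ih i (by simpa using h)]

def pvKfold (first : List Nat) (init : Nat) (l : List (List Nat)) : Nat :=
  l.foldl (fun m b => min m (pvLcp2 first b)) init

theorem pvKfold_le_init (first : List Nat) (init : Nat) (l : List (List Nat)) :
    pvKfold first init l ≤ init := by
  induction l generalizing init with
  | nil => simp [pvKfold]
  | cons b bs ih =>
    calc pvKfold first (min init (pvLcp2 first b)) bs ≤ min init (pvLcp2 first b) := ih _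
    _ ≤ init := Nat.min_le_left _ _

theorem pvKfold_le_mem (first : List Nat) (init : Nat) (l : List (List Nat))
    (b : List Nat) (hb : b ∈ l) : pvKfold first init l ≤ pvLcp2 first b := by
  induction l generalizing init with
  | nil => simp at hb
  | cons c cs ih =>
    rcases List.mem_cons.mp hb with h | h
    · subst h
      calc pvKfold first (min init (pvLcp2 first b)) cs ≤ min init (pvLcp2 first b) :=
        pvKfold_le_init _ _ _
      _ ≤ pvLcp2 first b := Nat.min_le_right _ _
    · exact ih _ h

theorem pvLe_Kfold (first : List Nat) (init : Nat) (l : List (List Nat)) (k : Nat)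
    (h0 : k ≤ init) (h : ∀ b ∈ l, k ≤ pvLcp2 first b) : k ≤ pvKfold first init l := by
  induction l generalizing init with
  | nil => simpa [pvKfold] using h0
  | cons c cs ih =>
    exact ih _ (le_min h0 (h c (by simp))) (fun b hb => h b (List.mem_cons_of_mem _ hb))

theorem pvFoldB (first : List Nat) (l : List (List Nat)) (m : Nat) :
    l.foldl (fun p b => p.take (pvLcp2 p b)) (first.take m)
      = first.take (pvKfold first m l) := by
  induction l generalizing m with
  | nil => simp [pvKfold]
  | cons b bs ih =>
    simp only [List.foldl_cons, pvKfold]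
    rw [pvLcp2_take, List.take_take]
    have h : min (min m (pvLcp2 first b)) m = min m (pvLcp2 first b) := by omega
    rw [h, ih]
    rfl

theorem pvALoop_len (ba : List (List Nat)) (first : List Nat) (n : Nat)
    (hlen : ∀ b ∈ ba, b.length = n) (hfl : first.length = n) :
    ∀ fuel i acc, i + fuel = n → acc.length = i →
      (∀ b ∈ ba, first.take i = b.take i) →
      (pvALoop ba first i fuel acc).length = pvKfold first n ba := by
  intro fuel
  induction fuel with
  | zero =>
    intro i acc hin hacc hpre
    rw [show i = n by omega] at hacc hpre
    have hge : ∀ b ∈ ba, n ≤ pvLcp2 first b := by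
      intro b hb
      exact (pvLcp2_ge_iff_take first b n (le_of_eq hfl.symm)
        (le_of_eq (hlen b hb).symm)).mpr (hpre b hb)
    have h1 := pvKfold_le_init first n ba
    have h2 := pvLe_Kfold first n ba n le_rfl hge
    simp only [pvALoop]
    omega
  | succ fuel ih =>
    intro i acc hin hacc hpre
    have hi : i < n := by omega
    simp only [pvALoop]
    split
    · rename_i hall
      refine ih (i + 1) (acc ++ [first.getD i 0]) (by omega) (by simp [hacc]) ?_
      intro b hb
      have hbeq : b.getD i 0 = first.getD i 0 := by
        have := List.all_eq_true.mp hall b hb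
        simpa using this
      rw [pvTake_succ_getD first i (by omega), pvTake_succ_getD b i (by rw [hlen b hb]; omega),
        hpre b hb, hbeq]
    · rename_i hall
      have hex : ∃ b ∈ ba, ¬ (b.getD i 0 = first.getD i 0) := by
        by_contra hc
        push_neg at hc
        exact hall (List.all_eq_true.mpr (fun b hb => by simpa using hc b hb))
      obtain ⟨b0, hb0, hne⟩ := hex
      have hle : pvLcp2 first b0 ≤ i := by
        by_contra hgt
        push_neg at hgt
        have ht : first.take (i + 1) = b0.take (i + 1) :=
          (pvLcp2_ge_iff_take first b0 (i + 1) (by omega)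
            (by rw [hlen b0 hb0]; omega)).mp hgt
        exact hne ((pvTake_eq_getD first b0 (i + 1) i ht (by omega)).symm)
      have hge : ∀ b ∈ ba, i ≤ pvLcp2 first b := by
        intro b hb
        exact (pvLcp2_ge_iff_take first b i (by omega) (by rw [hlen b hb]; omega)).mpr (hpre b hb)
      have h1 : pvKfold first n ba ≤ i := le_trans (pvKfold_le_mem first n ba b0 hb0) hle
      have h2 : i ≤ pvKfold first n ba := pvLe_Kfold first n ba i (by omega) hge
      omega

theorem pvPrefixLen (ba : List (List Nat)) (n : Nat) (hne : ba ≠ [])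
    (hlen : ∀ b ∈ ba, b.length = n) :
    (pvALoop ba (ba.headD []) 0 n []).length
      = (ba.tail.foldl (fun p b => p.take (pvLcp2 p b)) (ba.headD [])).length := by
  match ba with
  | [] => exact absurd rfl hne
  | c :: cs =>
    have hcl : c.length = n := hlen c (by simp)
    have hA : (pvALoop (c :: cs) c 0 n []).length = pvKfold c n (c :: cs) :=
      pvALoop_len (c :: cs) c n hlen hcl n 0 [] (by omega) rfl (by simp)
    have hKeq : pvKfold c n (c :: cs) = pvKfold c n cs := by
      simp [pvKfold, pvLcp2_self, hcl]
    have hB : cs.foldl (fun p b => p.take (pvLcp2 p b)) c = c.take (pvKfold c c.length cs) := by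
      have h := pvFoldB c cs c.length
      rwa [List.take_length] at h
    have hK : pvKfold c n cs ≤ n := pvKfold_le_init _ _ _
    simp only [List.headD_cons, List.tail_cons]
    rw [hA, hB, hKeq, hcl, List.length_take]
    omega

-- ===== VERDICT (by name: the statement is the Claim_ definition above) =====
theorem eliminate_common_leftmost_bytes_spec : Claim_equal_eliminate_common_leftmost_bytes := by
  intro int_array _ hpre
  obtain ⟨hne, _⟩ := hpre
  unfold Spec_eliminate_common_leftmost_bytes
  simp only [eliminate_common_leftmost_bytes, eliminate_common_leftmost_bytes_alt]
  rw [List.map_map]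
  have h := pvPrefixLen
    (int_array.map (fun x => pvToBytesBE x (((int_array.map (fun x => (pvBitLen x + 7) / 8)).max?).getD 0)))
    (((int_array.map (fun x => (pvBitLen x + 7) / 8)).max?).getD 0)
    (by simpa using hne)
    (by intro b hb; rcases List.mem_map.mp hb with ⟨x, _, rfl⟩; simp [pvToBytesBE])
  rw [h]
  simp [Function.comp]
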